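-- pv_equiv track=rewrite | github.com/TDTU-K25/linear-algebra | Lab02/lab2.py | deleteNegativeNum
-- ===== SOURCE A (Python) =====
-- def deleteNegativeNum(x):
--   x.sort()
--   count = 0
--   for i in range (0, len(x), 1):
--     if (x[i] < 0):
--       count += 1
--
--   for i in range (count - 1, -1, -1):
--     x.pop(i)
--   return x
-- ===== SOURCE B (Python) =====
-- def deleteNegativeNum(x):
--   # Simpler shape: sort, binary-search the first non-negative position, slice-delete.
--   x.sort()
--   lo, hi = 0, len(x)
--   while lo < hi:
--     mid = (lo + hi) // 2
--     if x[mid] < 0: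
--       lo = mid + 1
--     else:
--       hi = mid
--   del x[:lo]
--   return x
-- ===== Notes on version B (the rewrite author's own statement) =====
-- stated objective: alternative
-- what changed: A counts negatives with a linear scan and then pops them one-by-one front-to-back (each pop shifting the list); B finds the negative/non-negative boundary in the sorted list by binary search and deletes the prefix with one slice deletion.
import Mathlib
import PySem

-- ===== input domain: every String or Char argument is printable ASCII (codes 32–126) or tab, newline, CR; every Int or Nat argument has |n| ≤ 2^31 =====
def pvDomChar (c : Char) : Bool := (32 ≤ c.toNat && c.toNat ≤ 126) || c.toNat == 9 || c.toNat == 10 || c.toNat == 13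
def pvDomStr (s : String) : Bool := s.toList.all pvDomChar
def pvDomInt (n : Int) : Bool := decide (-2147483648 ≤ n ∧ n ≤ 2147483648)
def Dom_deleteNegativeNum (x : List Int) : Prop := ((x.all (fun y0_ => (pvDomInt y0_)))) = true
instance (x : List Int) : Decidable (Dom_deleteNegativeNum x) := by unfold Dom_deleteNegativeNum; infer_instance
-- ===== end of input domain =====

-- B replaces A's linear negative-count + one-by-one pop loop with a binary search for the
-- negative/non-negative boundary in the sorted list and a single slice deletion ('alternative').
-- A and B both mutate x in place in Python (sort + element removal); equivalence here is about the return value.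

-- ===== PORT A =====
def deleteNegativeNum (x : List Int) : List Int :=
  let s := PySem.List.sorted x (fun v => v)
  let count : Int := (PySem.List.pyRange 0 (PySem.List.len s) 1).foldl
      (fun c i => if PySem.List.pyGetD s i 0 < 0 then c + 1 else c) 0
  (PySem.List.pyRange (count - 1) (-1) (-1)).foldl
      (fun st i => match PySem.List.pop? st i with | some p => p.2 | none => st) s

-- ===== PORT B =====
-- bounds of the Python floor-division midpoint; cited by bsearchNegLoop's decreasing_by
theorem pvMidBounds {lo hi : Int} (h : lo < hi) :
    lo ≤ PySem.Int.floordiv (lo + hi) 2 ∧ PySem.Int.floordiv (lo + hi) 2 < hi := by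
  unfold PySem.Int.floordiv
  simp only [Int.fdiv_eq_ediv]
  norm_num
  omega

-- the while-loop of Source B: binary search for the first non-negative position
def bsearchNegLoop (s : List Int) (lo hi : Int) : Int :=
  if _h : lo < hi then
    if PySem.List.pyGetD s (PySem.Int.floordiv (lo + hi) 2) 0 < 0 then
      bsearchNegLoop s (PySem.Int.floordiv (lo + hi) 2 + 1) hi
    else
      bsearchNegLoop s lo (PySem.Int.floordiv (lo + hi) 2)
  else lo
termination_by (hi - lo).toNat
decreasing_by
  · have := pvMidBounds _h; omega
  · have := pvMidBounds _h; omega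

def deleteNegativeNum_alt (x : List Int) : List Int :=
  let s := PySem.List.sorted x (fun v => v)
  let lo := bsearchNegLoop s 0 (PySem.List.len s)
  PySem.List.slice s (some lo) none

-- ===== PRECONDITION & SPEC =====
def Spec_deleteNegativeNum (x : List Int) (out : List Int) : Prop := out = deleteNegativeNum_alt x
instance (x : List Int) (out : List Int) : Decidable (Spec_deleteNegativeNum x out) := by unfold Spec_deleteNegativeNum; infer_instance

-- ===== CLAIM (what is proved, stated in full; the proofs are below) =====
def Claim_equal_deleteNegativeNum : Prop := ∀ (x : List Int), Dom_deleteNegativeNum x → Spec_deleteNegativeNum x (deleteNegativeNum x)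

-- ===== LEMMAS AND PROOFS =====

-- ===== VERDICT (by name: the statement is the Claim_ definition above) =====
-- ===== LEMMAS =====

-- counting loop = countP
theorem pvFoldlCount (l : List Int) (a : Int) :
    l.foldl (fun c v => if v < 0 then c + 1 else c) a
      = a + (l.countP (fun v => decide (v < 0)) : Int) := by
  induction l generalizing a with
  | nil => simp
  | cons x t ih =>
      simp only [List.foldl_cons, List.countP_cons, ih]
      by_cases hx : x < 0 <;> simp [hx] <;> omega

-- in a sorted list, position m holds a negative iff m is below the negative count
theorem pvSortedNegIff (s : List Int) (hs : s.Pairwise (· ≤ ·)) :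
    ∀ (m : Nat) (h : m < s.length),
      (s[m] < 0 ↔ m < s.countP (fun v => decide (v < 0))) := by
  induction s with
  | nil => intro m h; simp at h
  | cons a t ih =>
      rcases List.pairwise_cons.mp hs with ⟨ha, ht⟩
      intro m h
      by_cases hneg : a < 0
      · cases m with
        | zero =>
            have h1 : (a :: t).countP (fun v => decide (v < 0))
                = t.countP (fun v => decide (v < 0)) + 1 := by
              simp [hneg]
            rw [h1]
            simp only [List.getElem_cons_zero]
            constructor
            · intro _; omega
            · intro _; exact hneg
        | succ m =>
            have hm : m < t.length := by simpa using h
            have hiff := ih ht m hm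
            simp only [List.getElem_cons_succ, List.countP_cons, hneg, decide_true, if_true]
            rw [hiff]
            omega
      · have hz : t.countP (fun v => decide (v < 0)) = 0 := by
          rw [List.countP_eq_zero]
          intro b hb
          have : a ≤ b := ha b hb
          simp; omega
        cases m with
        | zero => simp [hneg, hz]
        | succ m =>
            have hm : m < t.length := by simpa using h
            have hmem : t[m] ∈ t := List.getElem_mem hm
            have : a ≤ t[m] := ha _ hmem
            simp [hneg, hz]
            omega

-- binary search converges to the negative count
theorem pvBsearch (s : List Int) (hs : s.Pairwise (· ≤ ·)) :
    ∀ (n : Nat) (lo hi : Int), (hi - lo).toNat ≤ n → 0 ≤ lo →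
      lo ≤ (s.countP (fun v => decide (v < 0)) : Int) →
      (s.countP (fun v => decide (v < 0)) : Int) ≤ hi → hi ≤ s.length →
      bsearchNegLoop s lo hi = (s.countP (fun v => decide (v < 0)) : Int) := by
  intro n
  induction n with
  | zero =>
      intro lo hi h1 _ h3 h4 _
      rw [bsearchNegLoop]
      rw [dif_neg (by omega)]
      omega
  | succ n ih =>
      intro lo hi h1 h2 h3 h4 h5
      by_cases hlt : lo < hi
      · rw [bsearchNegLoop, dif_pos hlt]
        have hm := pvMidBounds hlt
        set mid := PySem.Int.floordiv (lo + hi) 2 with hmid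
        have hm0 : 0 ≤ mid := by omega
        have hmlen : mid < (s.length : Int) := by omega
        have hget : PySem.List.pyGetD s mid 0 = s[mid.toNat]'(by omega) :=
          PySem.List.pyGetD_eq_getElem s 0 hm0 hmlen
        have hiff := pvSortedNegIff s hs mid.toNat (by omega)
        by_cases hneg : PySem.List.pyGetD s mid 0 < 0
        · rw [if_pos hneg]
          have : mid.toNat < s.countP (fun v => decide (v < 0)) := by
            exact hiff.mp (by rw [← hget]; exact hneg)
          exact ih (mid + 1) hi (by omega) (by omega) (by omega) h4 h5
        · rw [if_neg hneg]
          have : ¬ mid.toNat < s.countP (fun v => decide (v < 0)) := by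
            intro hc
            exact hneg (by rw [hget]; exact hiff.mpr hc)
          exact ih lo mid (by omega) h2 h3 (by omega) (by omega)
      · rw [bsearchNegLoop, dif_neg hlt]
        omega

-- the pop-down loop deletes the first c elements
theorem pvPopLoop :
    ∀ (c : Nat) (l : List Int), c ≤ l.length →
      (PySem.List.pyRange ((c : Int) - 1) (-1) (-1)).foldl
        (fun st i => match PySem.List.pop? st i with | some p => p.2 | none => st) l
      = l.drop c := by
  intro c
  induction c with
  | zero =>
      intro l _
      rw [PySem.List.pyRange_neg_one_eq_nil (by omega)]
      simp
  | succ c ih =>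
      intro l hc
      have hcl : c < l.length := by omega
      have hstep : ((c : Int) + 1 - 1) = (c : Int) := by omega
      rw [show (((c : Nat) + 1 : Nat) : Int) - 1 = (c : Int) by push_cast; ring]
      rw [PySem.List.pyRange_neg_one_cons (by omega)]
      simp only [List.foldl_cons]
      rw [PySem.List.pop?_natCast l c hcl]
      have h2 : c ≤ (l.eraseIdx c).length := by
        rw [List.length_eraseIdx_of_lt hcl]; omega
      rw [ih (l.eraseIdx c) h2]
      rw [List.eraseIdx_eq_take_drop_succ]
      have hlt : (l.take c).length = c := by simp [Nat.le_of_lt hcl]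
      have hdl : List.drop (l.take c).length (l.take c ++ l.drop (c + 1)) = l.drop (c + 1) :=
        List.drop_left
      rw [hlt] at hdl
      exact hdl

-- ===== VERDICT =====
theorem deleteNegativeNum_spec : Claim_equal_deleteNegativeNum := by
  unfold Claim_equal_deleteNegativeNum
  intro x _
  unfold Spec_deleteNegativeNum deleteNegativeNum deleteNegativeNum_alt
  set s := PySem.List.sorted x (fun v => v) with hsdef
  have hs : s.Pairwise (· ≤ ·) := PySem.List.sorted_pairwise x (fun v => v)
  have hcle : s.countP (fun v => decide (v < 0)) ≤ s.length := List.countP_le_length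
  have hcount :
      (PySem.List.pyRange 0 (PySem.List.len s) 1).foldl
        (fun c i => if PySem.List.pyGetD s i 0 < 0 then c + 1 else c) (0 : Int)
      = (s.countP (fun v => decide (v < 0)) : Int) := by
    rw [PySem.List.foldl_pyRange_zero_pyGetD s 0
          (fun c v => if v < 0 then c + 1 else c) (0 : Int)]
    rw [pvFoldlCount]
    ring
  have hb : bsearchNegLoop s 0 (PySem.List.len s)
      = (s.countP (fun v => decide (v < 0)) : Int) := by
    have hlen : PySem.List.len s = (s.length : Int) := by simp [PySem.List.len]
    rw [hlen]
    exact pvBsearch s hs s.length 0 (s.length : Int) (by omega) (by omega)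
      (by exact_mod_cast Nat.zero_le _) (by exact_mod_cast hcle) (by omega)
  simp only [hcount, hb]
  rw [PySem.List.slice_from s (by exact_mod_cast Nat.zero_le _)]
  rw [pvPopLoop (s.countP (fun v => decide (v < 0))) s hcle]
  simp
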